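-- pv_equiv track=rewrite | github.com/juvelop17/problem_solving | PStest/201009_c/4.py | dfs
-- ===== SOURCE A (Python) =====
-- def dfs(cur, hub, dest, r_dict, visited):
--     if cur == dest:
--         if visited[hub]:
--             return 1
--         return 0
--     if visited[cur]:
--         return 0
--
--     cnt = 0
--     next_list = r_dict.get(cur,[])
--     for next in next_list:
--         visited[cur] = True
--         cnt += dfs(next,hub,dest,r_dict,visited)
--         visited[cur] = False
--
--     return cnt
-- ===== SOURCE B (Python) =====
-- def dfs(cur, hub, dest, r_dict, visited):
--     # Complementary counting: count all simple paths cur->dest (avoiding visited-True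
--     # nodes), then subtract those that avoid hub, instead of A's mark/unmark hub test.
--     def count(node, block, path):
--         if node == dest:
--             return 1
--         if node == block or node in path or visited[node]:
--             return 0
--         return sum(count(nxt, block, path + (node,)) for nxt in r_dict.get(node, []))
--     total = count(cur, None, ())
--     if total == 0:
--         return 0
--     if visited[hub]:
--         return total
--     return total - count(cur, hub, ())
-- ===== Notes on version B (the rewrite author's own statement) =====
-- stated objective: alternative
-- what changed: Replaces A's per-path hub test (mark visited[cur] True before each child call, unmark after, and check visited[hub] at dest) by complementary counting: a pure path-list DFS counts all simple paths cur->dest once, and the paths that avoid hub are counted separately and subtracted unless visited[hub] is preset True.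
import Mathlib
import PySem

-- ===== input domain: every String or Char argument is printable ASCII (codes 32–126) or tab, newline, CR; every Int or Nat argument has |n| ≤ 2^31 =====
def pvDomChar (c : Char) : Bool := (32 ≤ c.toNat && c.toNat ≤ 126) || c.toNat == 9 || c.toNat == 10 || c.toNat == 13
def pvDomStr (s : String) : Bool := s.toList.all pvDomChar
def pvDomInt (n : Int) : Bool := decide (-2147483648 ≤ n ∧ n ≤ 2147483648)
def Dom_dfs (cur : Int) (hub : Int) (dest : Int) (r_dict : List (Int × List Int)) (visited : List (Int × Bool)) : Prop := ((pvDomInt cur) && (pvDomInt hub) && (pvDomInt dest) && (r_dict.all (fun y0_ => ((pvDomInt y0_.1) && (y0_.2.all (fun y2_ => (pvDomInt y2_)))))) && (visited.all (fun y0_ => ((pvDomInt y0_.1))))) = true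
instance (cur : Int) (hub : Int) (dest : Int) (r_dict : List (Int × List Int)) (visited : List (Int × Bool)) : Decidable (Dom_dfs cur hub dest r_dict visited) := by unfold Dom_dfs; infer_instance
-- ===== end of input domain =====

-- B counts by complementary counting (all simple paths minus those avoiding hub) instead of
-- A's per-path mark/unmark hub test; equivalence is about the RETURN value only (A mutates
-- `visited` during the call but restores it before returning).

-- ===== PORT A =====
-- A's recursion, dict threaded through the per-child mark/recurse/unmark loop; the fuel
-- `visited.length + 1` bounds the real recursion depth (each level marks a fresh visited key),
-- so the 0-fuel branch is never the value on inputs admitted by Pre_.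
def dfsA (fuel : Nat) (cur hub dest : Int) (r : PySem.Dict Int (List Int))
    (d : PySem.Dict Int Bool) : Int × PySem.Dict Int Bool :=
  match fuel with
  | 0 => (0, d)
  | fuel + 1 =>
    if cur = dest then
      match d.get? hub with
      | some true => (1, d)          -- if visited[hub]: return 1
      | _ => (0, d)                  -- some false → return 0; none = KeyError (outside Pre_)
    else
      match d.get? cur with
      | some true => (0, d)          -- if visited[cur]: return 0
      | none => (0, d)               -- KeyError (outside Pre_)
      | some false =>
        (r.getD cur []).foldl        -- next_list = r_dict.get(cur, []); for next in next_list: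
          (fun st nxt =>
            let d1 := st.2.insert cur true               -- visited[cur] = True
            let p := dfsA fuel nxt hub dest r d1         -- cnt += dfs(next, ...)
            (st.1 + p.1, p.2.insert cur false))          -- visited[cur] = False
          (0, d)

def dfs (cur : Int) (hub : Int) (dest : Int) (r_dict : List (Int × List Int)) (visited : List (Int × Bool)) : Int :=
  (dfsA (visited.length + 1) cur hub dest (PySem.Dict.ofList r_dict) (PySem.Dict.ofList visited)).1

-- ===== PORT B =====
-- B's `count(node, block, path)`: number of simple paths node→dest avoiding `block`, the
-- nodes of `path` and the visited-True nodes; same fuel bound as A's port.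
def dfsC (fuel : Nat) (node : Int) (block : Option Int) (dest : Int)
    (r : PySem.Dict Int (List Int)) (v : PySem.Dict Int Bool) (path : List Int) : Int :=
  match fuel with
  | 0 => 0
  | fuel + 1 =>
    if node = dest then 1
    else if block = some node ∨ path.contains node = true then 0   -- node == block or node in path
    else match v.get? node with
      | some true => 0               -- or visited[node]
      | none => 0                    -- KeyError (outside Pre_)
      | some false =>
        (r.getD node []).foldl       -- sum(count(nxt, block, path + (node,)) for nxt in ...)
          (fun acc nxt => acc + dfsC fuel nxt block dest r v (path ++ [node])) 0

def dfs_alt (cur : Int) (hub : Int) (dest : Int) (r_dict : List (Int × List Int)) (visited : List (Int × Bool)) : Int :=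
  let r := PySem.Dict.ofList r_dict
  let v := PySem.Dict.ofList visited
  let fuel := visited.length + 1
  let total := dfsC fuel cur none dest r v []          -- total = count(cur, None, ())
  if total = 0 then 0                                  -- if total == 0: return 0
  else match v.get? hub with                           -- if visited[hub]: return total
    | some true => total
    | some false => total - dfsC fuel cur (some hub) dest r v []   -- total - count(cur, hub, ())
    | none => 0                                        -- KeyError (outside Pre_)

-- ===== PRECONDITION & SPEC =====
-- helpers for Pre_: nodes reachable from cur through nodes that are ≠ dest and visited-False
-- (exactly the nodes whose visited entry Python A looks up; A completes iff dest is reachable).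
def pvExpand (r : PySem.Dict Int (List Int)) (v : PySem.Dict Int Bool) (dest : Int) (n : Int) : List Int :=
  if n = dest then [] else match v.get? n with | some false => r.getD n [] | _ => []

def pvReach (r : PySem.Dict Int (List Int)) (v : PySem.Dict Int Bool) (dest : Int) : Nat → List Int → List Int
  | 0, s => s
  | k + 1, s => pvReach r v dest k (PySem.List.dedup (s ++ s.flatMap (pvExpand r v dest)))

-- Pre_ excludes exactly the inputs on which Python A raises KeyError: some node reachable from
-- cur (through visited-False non-dest nodes) lacks a visited entry, or dest is reachable (so a
-- path completes) and hub lacks one.  On every other input A returns normally.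
def Pre_dfs (cur : Int) (hub : Int) (dest : Int) (r_dict : List (Int × List Int)) (visited : List (Int × Bool)) : Prop :=
  let r := PySem.Dict.ofList r_dict
  let v := PySem.Dict.ofList visited
  let R := pvReach r v dest (r_dict.foldl (fun a p => a + p.2.length) 0 + 1) [cur]
  (∀ n ∈ R, n ≠ dest → v.contains n = true) ∧ (dest ∈ R → v.contains hub = true)
instance (cur : Int) (hub : Int) (dest : Int) (r_dict : List (Int × List Int)) (visited : List (Int × Bool)) : Decidable (Pre_dfs cur hub dest r_dict visited) := by unfold Pre_dfs; infer_instance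

def pvWitness_dfs : Int × Int × Int × (List (Int × List Int)) × (List (Int × Bool)) :=
  (0, 1, 2, [(0, [1]), (1, [2])], [(0, false), (1, false), (2, false)])

def Spec_dfs (cur : Int) (hub : Int) (dest : Int) (r_dict : List (Int × List Int)) (visited : List (Int × Bool)) (out : Int) : Prop := out = dfs_alt cur hub dest r_dict visited
instance (cur : Int) (hub : Int) (dest : Int) (r_dict : List (Int × List Int)) (visited : List (Int × Bool)) (out : Int) : Decidable (Spec_dfs cur hub dest r_dict visited out) := by unfold Spec_dfs; infer_instance

-- ===== CLAIM (what is proved, stated in full; the proofs are below) =====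
def Claim_equal_dfs : Prop := ∀ (cur : Int) (hub : Int) (dest : Int) (r_dict : List (Int × List Int)) (visited : List (Int × Bool)), Dom_dfs cur hub dest r_dict visited → Pre_dfs cur hub dest r_dict visited → Spec_dfs cur hub dest r_dict visited (dfs cur hub dest r_dict visited)

-- ===== LEMMAS AND PROOFS =====

-- count is a sum of 0/1 contributions, hence nonnegative.
lemma dfsC_nonneg (dest : Int) (r : PySem.Dict Int (List Int)) (v : PySem.Dict Int Bool) :
    ∀ (fuel : Nat) (node : Int) (block : Option Int) (path : List Int),
      0 ≤ dfsC fuel node block dest r v path := by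
  intro fuel
  induction fuel with
  | zero => intro node block path; simp [dfsC]
  | succ fuel ih =>
    intro node block path
    unfold dfsC
    split_ifs with h1 h2
    · omega
    · omega
    · cases hv : v.get? node with
      | none => simp
      | some b =>
        cases b
        · have hs : 0 ≤ ((r.getD node []).map
              (fun nxt => dfsC fuel nxt block dest r v (path ++ [node]))).sum := by
            apply List.sum_nonneg
            intro x hx
            obtain ⟨nxt, _, rfl⟩ := List.mem_map.mp hx
            exact ih nxt block (path ++ [node])
          simpa [PySem.List.foldl_add] using hs
        · simp

-- blocking hub only removes paths.
lemma dfsC_le_none (hub dest : Int) (r : PySem.Dict Int (List Int)) (v : PySem.Dict Int Bool) :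
    ∀ (fuel : Nat) (node : Int) (path : List Int),
      dfsC fuel node (some hub) dest r v path ≤ dfsC fuel node none dest r v path := by
  intro fuel
  induction fuel with
  | zero => intro node path; simp [dfsC]
  | succ fuel ih =>
    intro node path
    by_cases hd : node = dest
    · simp [dfsC, hd]
    · by_cases hp : path.contains node = true
      · unfold dfsC
        rw [if_neg hd, if_neg hd, if_pos (Or.inr hp), if_pos (Or.inr hp)]
      · by_cases hh : hub = node
        · calc dfsC (fuel + 1) node (some hub) dest r v path = 0 := by
                unfold dfsC
                rw [if_neg hd, if_pos (Or.inl (by rw [hh]))]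
             _ ≤ _ := dfsC_nonneg dest r v (fuel + 1) node none path
        · have hb : ¬ ((some hub : Option Int) = some node ∨ path.contains node = true) := by
            intro h
            rcases h with h | h
            · exact hh (Option.some.inj h)
            · exact hp h
          have hb' : ¬ ((none : Option Int) = some node ∨ path.contains node = true) := by
            intro h
            rcases h with h | h
            · simp at h
            · exact hp h
          unfold dfsC
          rw [if_neg hd, if_neg hd, if_neg hb, if_neg hb']
          cases hv : v.get? node with
          | none => exact le_rfl
          | some b =>
            cases b
            · simp only [PySem.List.foldl_add, zero_add]
              exact List.sum_le_sum (fun nxt _ => ih nxt (path ++ [node]))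
            · exact le_rfl

-- if hub has no visited entry, no simple path can go through it: blocking it changes nothing.
lemma dfsC_hub_none (hub dest : Int) (r : PySem.Dict Int (List Int)) (v : PySem.Dict Int Bool)
    (hv : v.get? hub = none) :
    ∀ (fuel : Nat) (node : Int) (path : List Int),
      dfsC fuel node (some hub) dest r v path = dfsC fuel node none dest r v path := by
  intro fuel
  induction fuel with
  | zero => intro node path; rfl
  | succ fuel ih =>
    intro node path
    by_cases hd : node = dest
    · simp [dfsC, hd]
    · by_cases hp : path.contains node = true
      · unfold dfsC
        rw [if_neg hd, if_neg hd, if_pos (Or.inr hp), if_pos (Or.inr hp)]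
      · by_cases hh : hub = node
        · subst hh
          have hb' : ¬ ((none : Option Int) = some hub ∨ path.contains hub = true) := by
            intro h
            rcases h with h | h
            · simp at h
            · exact hp h
          unfold dfsC
          rw [if_neg hd, if_pos (Or.inl rfl), if_neg hd, if_neg hb', hv]
        · have hb : ¬ ((some hub : Option Int) = some node ∨ path.contains node = true) := by
            intro h
            rcases h with h | h
            · exact hh (Option.some.inj h)
            · exact hp h
          have hb' : ¬ ((none : Option Int) = some node ∨ path.contains node = true) := by
            intro h
            rcases h with h | h
            · simp at h
            · exact hp h
          unfold dfsC
          rw [if_neg hd, if_neg hd, if_neg hb, if_neg hb']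
          cases hv' : v.get? node with
          | none => rfl
          | some b =>
            cases b
            · have : (fun (acc : Int) nxt => acc + dfsC fuel nxt (some hub) dest r v (path ++ [node]))
                   = (fun (acc : Int) nxt => acc + dfsC fuel nxt none dest r v (path ++ [node])) := by
                funext acc nxt; rw [ih]
              rw [this]
            · rfl

-- sum of differences is the difference of sums.
lemma pv_sum_map_sub (f g : Int → Int) : ∀ (l : List Int),
    (l.map (fun x => f x - g x)).sum = (l.map f).sum - (l.map g).sum := by
  intro l
  induction l with
  | nil => simp
  | cons x t ih => simp [ih]; ring

-- one unfolding step of count at an expandable node.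
lemma dfsC_expand (fuel : Nat) (node : Int) (block : Option Int) (dest : Int)
    (r : PySem.Dict Int (List Int)) (v : PySem.Dict Int Bool) (path : List Int)
    (hd : node ≠ dest) (hg : ¬ (block = some node ∨ path.contains node = true))
    (hv : v.get? node = some false) :
    dfsC (fuel + 1) node block dest r v path
      = ((r.getD node []).map (fun nxt => dfsC fuel nxt block dest r v (path ++ [node]))).sum := by
  conv_lhs => rw [dfsC]
  rw [if_neg hd, if_neg hg, hv]
  simp only [PySem.List.foldl_add, zero_add]

-- Core simulation: with A's threaded dict equal to v0 overridden `true` on the path nodes,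
-- A's count is (all paths) when hub is already certain to be on/True, else (all) − (avoiding hub),
-- and A's loop hands back a dict that looks up exactly like the one it received.
lemma dfsA_eq_dfsC (hub dest : Int) (r : PySem.Dict Int (List Int)) (v0 : PySem.Dict Int Bool) :
    ∀ (fuel : Nat) (cur : Int) (d : PySem.Dict Int Bool) (path : List Int),
      (∀ x, d.get? x = if path.contains x = true then some true else v0.get? x) →
      ((dfsA fuel cur hub dest r d).1 =
        (if v0.get? hub = some true ∨ path.contains hub = true
         then dfsC fuel cur none dest r v0 path
         else dfsC fuel cur none dest r v0 path - dfsC fuel cur (some hub) dest r v0 path)) ∧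
      (∀ x, (dfsA fuel cur hub dest r d).2.get? x = d.get? x) := by
  intro fuel
  induction fuel with
  | zero =>
    intro cur d path H
    constructor
    · simp only [dfsA, dfsC]; split_ifs <;> omega
    · exact fun _ => rfl
  | succ fuel ih =>
    intro cur d path H
    by_cases hcd : cur = dest
    · -- cur == dest: A reads hub's current mark; both counts are 1 here
      have Hh := H hub
      have c1 : ∀ b : Option Int, dfsC (fuel + 1) cur b dest r v0 path = 1 := by
        intro b; unfold dfsC; rw [if_pos hcd]
      refine ⟨?_, ?_⟩
      · unfold dfsA
        rw [if_pos hcd, Hh, c1, c1]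
        by_cases hp : path.contains hub = true
        · rw [if_pos hp, if_pos (Or.inr hp)]
        · rw [if_neg hp]
          cases hv : v0.get? hub with
          | none =>
            rw [if_neg (by intro h; rcases h with h | h; exacts [absurd h (by simp), hp h])]
            show (0 : Int) = 1 - 1
            norm_num
          | some b =>
            cases b
            · rw [if_neg (by intro h; rcases h with h | h; exacts [absurd h (by simp), hp h])]
              show (0 : Int) = 1 - 1
              norm_num
            · rw [if_pos (Or.inl rfl)]
      · intro x
        unfold dfsA
        rw [if_pos hcd]
        cases h : d.get? hub with
        | none => rfl
        | some b => cases b <;> rfl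
    · have Hc := H cur
      by_cases hp : path.contains cur = true
      · -- cur already on the path: marked True, both sides 0
        have hd : d.get? cur = some true := by rw [Hc, if_pos hp]
        have h2 : (dfsA (fuel + 1) cur hub dest r d).2 = d := by
          unfold dfsA; rw [if_neg hcd, hd]
        have c0 : ∀ b : Option Int, dfsC (fuel + 1) cur b dest r v0 path = 0 := by
          intro b; unfold dfsC; rw [if_neg hcd, if_pos (Or.inr hp)]
        refine ⟨?_, fun x => by rw [h2]⟩
        unfold dfsA
        rw [if_neg hcd, hd, c0, c0]
        show (0 : Int) = if _ then 0 else 0 - 0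
        split_ifs <;> norm_num
      · have hd : d.get? cur = v0.get? cur := by rw [Hc, if_neg hp]
        cases hv : v0.get? cur with
        | none =>
          -- KeyError node: A returns 0, both counts 0
          rw [hv] at hd
          have c1 : ∀ b, dfsC (fuel + 1) cur b dest r v0 path = 0 ∨
              (b = some cur ∧ dfsC (fuel + 1) cur b dest r v0 path = 0) := by
            intro b
            left
            unfold dfsC
            rw [if_neg hcd]
            split_ifs with h
            · rfl
            · rw [hv]
          refine ⟨?_, ?_⟩
          · have e1 : dfsC (fuel + 1) cur none dest r v0 path = 0 := by
              rcases c1 none with h | ⟨_, h⟩ <;> exact h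
            have e2 : dfsC (fuel + 1) cur (some hub) dest r v0 path = 0 := by
              rcases c1 (some hub) with h | ⟨_, h⟩ <;> exact h
            unfold dfsA
            rw [if_neg hcd, hd, e1, e2]
            show (0 : Int) = if _ then 0 else 0 - 0
            split_ifs <;> norm_num
          · intro x
            have h2 : (dfsA (fuel + 1) cur hub dest r d).2 = d := by
              unfold dfsA; rw [if_neg hcd, hd]
            rw [h2]
        | some b =>
          rw [hv] at hd
          cases b
          · -- unvisited: A's for-loop vs the two counts' sums over children
            have hguard : ∀ (b : Option Int), b ≠ some cur →
                ¬ (b = some cur ∨ path.contains cur = true) := by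
              intro b hb h
              rcases h with h | h
              · exact hb h
              · exact hp h
            -- per-child target value
            have hpath' : ∀ x, (path ++ [cur]).contains x = (path.contains x || (x = cur : Bool)) := by
              intro x
              simp [List.contains_eq_mem, List.mem_append]
            -- A's loop: threaded dict and accumulated count
            have aux : ∀ (l : List Int) (acc : Int) (d' : PySem.Dict Int Bool),
                (∀ x, d'.get? x = d.get? x) →
                ((l.foldl (fun st nxt =>
                    let d1 := st.2.insert cur true
                    let p := dfsA fuel nxt hub dest r d1
                    (st.1 + p.1, p.2.insert cur false)) (acc, d')).1
                  = acc + (l.map (fun nxt =>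
                      if v0.get? hub = some true ∨ (path ++ [cur]).contains hub = true
                      then dfsC fuel nxt none dest r v0 (path ++ [cur])
                      else dfsC fuel nxt none dest r v0 (path ++ [cur])
                           - dfsC fuel nxt (some hub) dest r v0 (path ++ [cur]))).sum) ∧
                (∀ x, (l.foldl (fun st nxt =>
                    let d1 := st.2.insert cur true
                    let p := dfsA fuel nxt hub dest r d1
                    (st.1 + p.1, p.2.insert cur false)) (acc, d')).2.get? x = d.get? x) := by
              intro l
              induction l with
              | nil => intro acc d' Hd'; exact ⟨by simp, Hd'⟩
              | cons nxt t tih =>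
                intro acc d' Hd'
                have Hd1 : ∀ x, (d'.insert cur true).get? x =
                    if (path ++ [cur]).contains x = true then some true else v0.get? x := by
                  intro x
                  rw [PySem.Dict.get?_insert, hpath' x]
                  by_cases hx : x = cur
                  · simp [hx]
                  · simp only [if_neg hx, Hd' x, H x]
                    simp [hx]
                obtain ⟨ih1, ih2⟩ := ih nxt (d'.insert cur true) (path ++ [cur]) Hd1
                have Hd2 : ∀ x,
                    ((dfsA fuel nxt hub dest r (d'.insert cur true)).2.insert cur false).get? x
                      = d.get? x := by
                  intro x
                  rw [PySem.Dict.get?_insert]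
                  by_cases hx : x = cur
                  · rw [if_pos hx, hx, hd]
                  · rw [if_neg hx, ih2 x, PySem.Dict.get?_insert, if_neg hx, Hd' x]
                obtain ⟨e1, e2⟩ := tih
                  (acc + (dfsA fuel nxt hub dest r (d'.insert cur true)).1)
                  ((dfsA fuel nxt hub dest r (d'.insert cur true)).2.insert cur false) Hd2
                refine ⟨?_, ?_⟩
                · simp only [List.foldl_cons, List.map_cons, List.sum_cons]
                  rw [e1, ih1]
                  ring
                · simpa only [List.foldl_cons] using e2
            obtain ⟨a1, a2⟩ := aux (r.getD cur []) 0 d (fun _ => rfl)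
            -- unfold the counts at the parent
            have cnone : dfsC (fuel + 1) cur none dest r v0 path
                = ((r.getD cur []).map (fun nxt => dfsC fuel nxt none dest r v0 (path ++ [cur]))).sum :=
              dfsC_expand fuel cur none dest r v0 path hcd (hguard none (by simp)) hv
            refine ⟨?_, ?_⟩
            · simp only [dfsA, if_neg hcd, hd]
              rw [a1, zero_add]
              by_cases hP : v0.get? hub = some true ∨ path.contains hub = true
              · -- hub already certain: every child target is its plain count
                have hP' : v0.get? hub = some true ∨ (path ++ [cur]).contains hub = true := by
                  rcases hP with h | h
                  · exact Or.inl h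
                  · right; rw [hpath' hub, h]; simp
                rw [if_pos hP]
                rw [cnone]
                congr 1
                apply List.map_congr_left
                intro nxt _
                rw [if_pos hP']
              · rw [if_neg hP]
                by_cases hhc : hub = cur
                · -- entering hub right now: children count plainly, blocked count is 0 at the parent
                  have hP' : v0.get? hub = some true ∨ (path ++ [cur]).contains hub = true := by
                    right; rw [hpath' hub]; simp [hhc]
                  have chub : dfsC (fuel + 1) cur (some hub) dest r v0 path = 0 := by
                    unfold dfsC
                    rw [if_neg hcd, if_pos (Or.inl (by rw [hhc]))]
                  rw [chub, sub_zero, cnone]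
                  congr 1
                  apply List.map_congr_left
                  intro nxt _
                  rw [if_pos hP']
                · -- hub still open: per child (all) − (avoiding hub), sums subtract
                  have hP' : ¬ (v0.get? hub = some true ∨ (path ++ [cur]).contains hub = true) := by
                    intro h
                    rcases h with h | h
                    · exact hP (Or.inl h)
                    · rw [hpath' hub] at h
                      rcases Bool.or_eq_true_iff.mp h with h | h
                      · exact hP (Or.inr h)
                      · exact hhc (by simpa using h)
                  have chub : dfsC (fuel + 1) cur (some hub) dest r v0 path
                      = ((r.getD cur []).map (fun nxt => dfsC fuel nxt (some hub) dest r v0 (path ++ [cur]))).sum :=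
                    dfsC_expand fuel cur (some hub) dest r v0 path hcd
                      (hguard (some hub) (by simpa using hhc)) hv
                  rw [cnone, chub]
                  have := pv_sum_map_sub
                    (fun nxt => dfsC fuel nxt none dest r v0 (path ++ [cur]))
                    (fun nxt => dfsC fuel nxt (some hub) dest r v0 (path ++ [cur]))
                    (r.getD cur [])
                  rw [← this]
                  congr 1
                  apply List.map_congr_left
                  intro nxt _
                  rw [if_neg hP']
            · simp only [dfsA, if_neg hcd, hd]
              exact a2
          · -- visited[cur] is True: A returns 0, both counts 0
            have c0 : ∀ (b : Option Int), ¬ (b = some cur ∨ path.contains cur = true) →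
                dfsC (fuel + 1) cur b dest r v0 path = 0 := by
              intro b hb
              unfold dfsC
              rw [if_neg hcd, if_neg hb, hv]
            have h2 : (dfsA (fuel + 1) cur hub dest r d).2 = d := by
              unfold dfsA; rw [if_neg hcd, hd]
            refine ⟨?_, fun x => by rw [h2]⟩
            unfold dfsA
            rw [if_neg hcd, hd]
            by_cases hhc : hub = cur
            · have e1 : dfsC (fuel + 1) cur none dest r v0 path = 0 := c0 none (fun h => h.elim (fun h => by simp at h) hp)
              have e2 : dfsC (fuel + 1) cur (some hub) dest r v0 path = 0 := by
                unfold dfsC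
                rw [if_neg hcd, if_pos (Or.inl (by rw [hhc]))]
              rw [e1, e2]
              split_ifs <;> rfl
            · have e1 : dfsC (fuel + 1) cur none dest r v0 path = 0 := c0 none (fun h => h.elim (fun h => by simp at h) hp)
              have e2 : dfsC (fuel + 1) cur (some hub) dest r v0 path = 0 :=
                c0 (some hub) (fun h => h.elim (fun h => hhc (Option.some.inj h)) hp)
              rw [e1, e2]
              split_ifs <;> rfl

-- ===== VERDICT (by name: the statement is the Claim_ definition above) =====
theorem dfs_spec : Claim_equal_dfs := by
  intro cur hub dest r_dict visited _ _
  unfold Spec_dfs dfs dfs_alt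
  set r := PySem.Dict.ofList r_dict
  set v0 := PySem.Dict.ofList visited
  set F := visited.length + 1 with hF
  have main := (dfsA_eq_dfsC hub dest r v0 F cur v0 []
    (fun x => by simp)).1
  rw [main]
  simp only [List.contains_nil, Bool.false_eq_true, or_false]
  cases hv : v0.get? hub with
  | some b =>
    cases b
    · -- visited[hub] is False: A = total − blocked; B subtracts unless total = 0
      rw [if_neg (by simp)]
      have hle := dfsC_le_none hub dest r v0 F cur []
      have hnn := dfsC_nonneg dest r v0 F cur (some hub) []
      show dfsC F cur none dest r v0 [] - dfsC F cur (some hub) dest r v0 []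
          = if dfsC F cur none dest r v0 [] = 0 then 0
            else dfsC F cur none dest r v0 [] - dfsC F cur (some hub) dest r v0 []
      split_ifs with h0
      · omega
      · rfl
    · rw [if_pos rfl]
      show dfsC F cur none dest r v0 []
          = if dfsC F cur none dest r v0 [] = 0 then 0 else dfsC F cur none dest r v0 []
      split_ifs with h0
      · omega
      · rfl
  | none =>
    -- hub has no entry: blocking it changes nothing, both sides are 0
    rw [if_neg (by simp), dfsC_hub_none hub dest r v0 hv F cur []]
    show dfsC F cur none dest r v0 [] - dfsC F cur none dest r v0 []
        = if dfsC F cur none dest r v0 [] = 0 then 0 else 0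
    split_ifs <;> omega
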